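-- pv_equiv track=rewrite | github.com/Hsiangpo/OldironCrawler | src/oldironcrawler/extractor/llm_client.py | _collect_representative_windows
-- ===== SOURCE A (Python) =====
-- _REPRESENTATIVE_CONTENT_HINTS = (
--     "about", "accountant", "bio", "board", "chief", "co-founder", "contact",
--     "director", "executive", "founder", "general partner", "impressum", "imprint",
--     "leadership", "management", "officer", "our story", "owner", "partner",
--     "people", "president", "principal", "profile", "referral", "solicitor",
--     "team", "vice-chancellor", "who we are",
-- )
--
-- def _collect_representative_windows(lines: list[str]) -> list[tuple[int, int]]:
--     windows: list[tuple[int, int]] = []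
--     for index, line in enumerate(lines):
--         lowered = line.lower()
--         if any(hint in lowered for hint in _REPRESENTATIVE_CONTENT_HINTS):
--             windows.append((max(0, index - 2), min(len(lines), index + 8)))
--     if not windows:
--         return []
--     merged: list[tuple[int, int]] = []
--     start, end = windows[0]
--     for next_start, next_end in windows[1:]:
--         if next_start <= end + 2:
--             end = max(end, next_end)
--             continue
--         merged.append((start, end))
--         start, end = next_start, next_end
--     merged.append((start, end))
--     return merged[:8]
-- ===== SOURCE B (Python) =====
-- _REPRESENTATIVE_CONTENT_HINTS = (
--     "about", "accountant", "bio", "board", "chief", "co-founder", "contact",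
--     "director", "executive", "founder", "general partner", "impressum", "imprint",
--     "leadership", "management", "officer", "our story", "owner", "partner",
--     "people", "president", "principal", "profile", "referral", "solicitor",
--     "team", "vice-chancellor", "who we are",
-- )
--
--
-- def _collect_representative_windows(lines):
--     # Coverage-array approach: mark every line index covered by some hit's
--     # window [max(0,i-2), min(n,i+8)), then scan the boolean coverage once,
--     # turning covered indices into runs and bridging runs separated by at most
--     # two uncovered lines (the closed form of the original interval merge).
--     n = len(lines)
--     covered = [False] * n
--     for i, line in enumerate(lines):
--         lowered = line.lower()
--         if any(hint in lowered for hint in _REPRESENTATIVE_CONTENT_HINTS):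
--             for k in range(max(0, i - 2), min(n, i + 8)):
--                 covered[k] = True
--     runs = []
--     for k, c in enumerate(covered):
--         if c:
--             if runs and k - runs[-1][1] <= 2:
--                 runs[-1] = (runs[-1][0], k + 1)
--             else:
--                 runs.append((k, k + 1))
--     return runs[:8]
-- ===== Notes on version B (the rewrite author's own statement) =====
-- stated objective: alternative
-- what changed: B replaces A's interval-list construction and boundary-merge traversal by a boolean coverage array over line indices: each matching line marks its window range as covered, and a single scan of the coverage extracts maximal covered runs, bridging runs separated by at most two uncovered lines (the closed form of A's merge test).
import Mathlib
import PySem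

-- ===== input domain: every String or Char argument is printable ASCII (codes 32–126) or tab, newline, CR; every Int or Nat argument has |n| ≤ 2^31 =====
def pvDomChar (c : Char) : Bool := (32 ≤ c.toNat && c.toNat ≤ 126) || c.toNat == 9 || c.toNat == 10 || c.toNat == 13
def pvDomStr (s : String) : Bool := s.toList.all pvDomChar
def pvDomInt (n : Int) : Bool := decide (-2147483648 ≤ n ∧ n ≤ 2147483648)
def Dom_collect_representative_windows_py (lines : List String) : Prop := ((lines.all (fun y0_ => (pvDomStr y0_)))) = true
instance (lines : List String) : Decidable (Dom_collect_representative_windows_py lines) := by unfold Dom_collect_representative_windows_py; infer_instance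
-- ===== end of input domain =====

-- B replaces A's interval list + boundary merge by a boolean coverage array over line
-- indices, then one scan extracting covered runs with gap-≤2 bridging; objective:
-- alternative. Return values proved equal on all inputs.

-- ===== PORT A =====
def pvHints : List String :=
  ["about", "accountant", "bio", "board", "chief", "co-founder", "contact",
   "director", "executive", "founder", "general partner", "impressum", "imprint",
   "leadership", "management", "officer", "our story", "owner", "partner",
   "people", "president", "principal", "profile", "referral", "solicitor",
   "team", "vice-chancellor", "who we are"]

-- any(hint in line.lower() for hint in _REPRESENTATIVE_CONTENT_HINTS)
def pvMatch (line : String) : Bool :=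
  pvHints.any (fun h => PySem.Str.isIn h (PySem.Str.lower line))

def collect_representative_windows_py (lines : List String) : List (Int × Int) :=
  let windows : List (Int × Int) :=
    (PySem.List.enumerate lines).foldl
      (fun ws p =>
        if pvMatch p.2 then
          ws ++ [(max 0 (p.1 - 2), min (lines.length : Int) (p.1 + 8))]
        else ws) []
  match windows with
  | [] => []
  | w0 :: rest =>
      -- state = (merged, start, end)
      let st := rest.foldl
        (fun (st : List (Int × Int) × Int × Int) w =>
          if w.1 ≤ st.2.2 + 2 then (st.1, st.2.1, max st.2.2 w.2)
          else (st.1 ++ [(st.2.1, st.2.2)], w.1, w.2)) ([], w0.1, w0.2)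
      PySem.List.slice (st.1 ++ [(st.2.1, st.2.2)]) none (some 8)

-- ===== PORT B =====
def collect_representative_windows_py_alt (lines : List String) : List (Int × Int) :=
  let n : Int := lines.length
  -- covered[k] = some matching line's window [max(0,i-2), min(n,i+8)) contains k
  -- (covered[k] = True: index k always lies in range, so pySetD is exact here)
  let covered : List Bool :=
    (PySem.List.enumerate lines).foldl
      (fun cs p =>
        if pvMatch p.2 then
          (PySem.List.pyRange (max 0 (p.1 - 2)) (min n (p.1 + 8)) 1).foldl
            (fun cs k => PySem.List.pySetD cs k true) cs
        else cs)
      (List.replicate lines.length false)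
  -- one scan: collect maximal covered runs, bridging gaps of at most 2 uncovered lines
  let runs : List (Int × Int) :=
    (PySem.List.enumerate covered).foldl
      (fun rs p =>
        if p.2 then
          match rs.getLast? with
          | some r =>
              if p.1 - r.2 ≤ 2 then rs.dropLast ++ [(r.1, p.1 + 1)]
              else rs ++ [(p.1, p.1 + 1)]
          | none => rs ++ [(p.1, p.1 + 1)]
        else rs) []
  PySem.List.slice runs none (some 8)

-- ===== PRECONDITION & SPEC =====
def Spec_collect_representative_windows_py (lines : List String) (out : List (Int × Int)) : Prop := out = collect_representative_windows_py_alt lines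
instance (lines : List String) (out : List (Int × Int)) : Decidable (Spec_collect_representative_windows_py lines out) := by unfold Spec_collect_representative_windows_py; infer_instance

-- ===== CLAIM (what is proved, stated in full; the proofs are below) =====
def Claim_equal_collect_representative_windows_py : Prop := ∀ (lines : List String), Dom_collect_representative_windows_py lines → Spec_collect_representative_windows_py lines (collect_representative_windows_py lines)

-- ===== LEMMAS AND PROOFS =====

-- the matching line indices, in order
def pvHitsOf (lines : List String) : List Int :=
  ((PySem.List.enumerate lines).filter (fun p => pvMatch p.2)).map (fun p => p.1)

-- the window of one hit i
def pvWin (n i : Int) : Int × Int := (max 0 (i - 2), min n (i + 8))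

-- reference grouping of the hit indices: gfirst/prev = first/last hit of the open group
def pvGrp (n : Int) (gfirst prev : Int) : List Int → List (Int × Int)
  | [] => [(max 0 (gfirst - 2), min n (prev + 8))]
  | j :: rest =>
      if j - prev ≤ 12 then pvGrp n gfirst j rest
      else (max 0 (gfirst - 2), min n (prev + 8)) :: pvGrp n j j rest

def pvTop (n : Int) : List Int → List (Int × Int)
  | [] => []
  | h :: t => pvGrp n h h t

-- coverage predicate of a hit list
def pvCov (n : Int) (is : List Int) (j : Int) : Bool :=
  is.any (fun i => decide (max 0 (i - 2) ≤ j ∧ j < min n (i + 8)))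

-- one step of B's run scan at a covered index k
def pvStep (rs : List (Int × Int)) (k : Int) : List (Int × Int) :=
  match rs.getLast? with
  | some r => if k - r.2 ≤ 2 then rs.dropLast ++ [(r.1, k + 1)] else rs ++ [(k, k + 1)]
  | none => rs ++ [(k, k + 1)]

-- B's run scan over index range [a,b)
def pvRunF (n : Int) (is : List Int) (a b : Int) (rs : List (Int × Int)) : List (Int × Int) :=
  (PySem.List.pyRange a b 1).foldl (fun rs j => if pvCov n is j then pvStep rs j else rs) rs

-- effect of a maximal all-covered block [a,b) on the run list
def pvMergeStep (a b : Int) (rs : List (Int × Int)) : List (Int × Int) :=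
  match rs.getLast? with
  | some r => if a - r.2 ≤ 2 then rs.dropLast ++ [(r.1, b)] else rs ++ [(a, b)]
  | none => rs ++ [(a, b)]

-- grouping truncated at cutoff m: only hits whose window start lies below m, last end capped at m
def capGrp (n m : Int) (f p : Int) : List Int → List (Int × Int)
  | [] => [(max 0 (f - 2), min (min n (p + 8)) m)]
  | j :: rest =>
      if max 0 (j - 2) < m then
        if j - p ≤ 12 then capGrp n m f j rest
        else (max 0 (f - 2), min n (p + 8)) :: capGrp n m j j rest
      else [(max 0 (f - 2), min (min n (p + 8)) m)]

def capTop (n m : Int) : List Int → List (Int × Int)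
  | [] => []
  | h :: t => if max 0 (h - 2) < m then capGrp n m h h t else []

-- ---- A-side reduction (interval merge over windows = pvGrp over hits) ----

lemma pvMergeFold (n : Int) :
    ∀ (t : List Int) (acc : List (Int × Int)) (gfirst prev : Int),
      0 ≤ prev → prev < n → List.IsChain (· < ·) (prev :: t) → (∀ j ∈ t, j < n) →
      (let st := (t.map (pvWin n)).foldl
          (fun (st : List (Int × Int) × Int × Int) w =>
            if w.1 ≤ st.2.2 + 2 then (st.1, st.2.1, max st.2.2 w.2)
            else (st.1 ++ [(st.2.1, st.2.2)], w.1, w.2))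
          (acc, max 0 (gfirst - 2), min n (prev + 8));
       st.1 ++ [(st.2.1, st.2.2)]) = acc ++ pvGrp n gfirst prev t := by
  intro t
  induction t with
  | nil => intro acc gfirst prev _ _ _ _; simp [pvGrp]
  | cons j rest ih =>
      intro acc gfirst prev h0 hn hch hb
      rw [List.isChain_cons_cons] at hch
      obtain ⟨hpj, hch⟩ := hch
      have hjn : j < n := hb j (by simp)
      have hb' : ∀ x ∈ rest, x < n := fun x hx => hb x (by simp [hx])
      simp only [List.map_cons, List.foldl_cons, pvGrp, pvWin]
      by_cases hc : j - prev ≤ 12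
      · have hcond : max 0 (j - 2) ≤ min n (prev + 8) + 2 := by omega
        have hmax : max (min n (prev + 8)) (min n (j + 8)) = min n (j + 8) := by omega
        simp only [if_pos hcond, hmax, if_pos hc]
        exact ih acc gfirst j (by omega) hjn hch hb'
      · have hcond : ¬ (max 0 (j - 2) ≤ min n (prev + 8) + 2) := by omega
        simp only [if_neg hcond, if_neg hc]
        have := ih (acc ++ [(max 0 (gfirst - 2), min n (prev + 8))]) j j (by omega) hjn hch hb'
        simpa [List.append_assoc] using this

lemma pvHitsSorted (lines : List String) : (pvHitsOf lines).Pairwise (· < ·) := by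
  unfold pvHitsOf
  rw [List.pairwise_map]
  exact (PySem.List.pairwise_lt_enumerate lines 0).filter _

lemma pvHitsBounds (lines : List String) :
    ∀ i ∈ pvHitsOf lines, 0 ≤ i ∧ i < (lines.length : Int) := by
  intro i hi
  unfold pvHitsOf at hi
  obtain ⟨p, hp, rfl⟩ := List.mem_map.mp hi
  have hp' := List.mem_of_mem_filter hp
  obtain ⟨k, hk, rfl⟩ := (PySem.List.mem_enumerate_iff lines 0 p).mp hp'
  simp only [zero_add]
  omega

lemma A_char (lines : List String) :
    collect_representative_windows_py lines
      = PySem.List.slice (pvTop (lines.length : Int) (pvHitsOf lines)) none (some 8) := by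
  unfold collect_representative_windows_py
  dsimp only
  rw [PySem.List.foldl_append_if]
  simp only [List.nil_append]
  have hmapwin :
      ((PySem.List.enumerate lines).filter (fun p => pvMatch p.2)).map
          (fun p => (max 0 (p.1 - 2), min (lines.length : Int) (p.1 + 8)))
        = (pvHitsOf lines).map (pvWin (lines.length : Int)) := by
    unfold pvHitsOf; rw [List.map_map]; rfl
  rw [hmapwin]
  have hsorted := pvHitsSorted lines
  have hbounds := pvHitsBounds lines
  cases hhits : pvHitsOf lines with
  | nil => simp [pvTop, PySem.List.slice_to _ (by norm_num : (0:Int) ≤ 8)]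
  | cons h t =>
      rw [hhits] at hsorted hbounds
      have hh := hbounds h (by simp)
      have hch : List.IsChain (· < ·) (h :: t) := List.isChain_iff_pairwise.mpr hsorted
      have hb' : ∀ j ∈ t, j < (lines.length : Int) := fun j hj => (hbounds j (by simp [hj])).2
      simp only [List.map_cons]
      have hA := pvMergeFold (lines.length : Int) t [] h h hh.1 hh.2 hch hb'
      simp only [List.nil_append] at hA
      rw [pvTop, ← hA]
      rfl

-- ---- B-side: coverage characterization ----

lemma pvSetFold_length :
    ∀ (ks : List Int) (cs : List Bool),
      (∀ k ∈ ks, 0 ≤ k) →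
      (ks.foldl (fun cs k => PySem.List.pySetD cs k true) cs).length = cs.length := by
  intro ks
  induction ks with
  | nil => intro cs _; rfl
  | cons k ks ih =>
      intro cs hk
      simp only [List.foldl_cons]
      rw [PySem.List.pySetD_of_nonneg _ _ (hk k (by simp))]
      rw [ih _ (fun x hx => hk x (by simp [hx]))]
      simp

lemma pvSetFold_getD :
    ∀ (ks : List Int) (cs : List Bool) (j : Nat), (∀ k ∈ ks, 0 ≤ k) → j < cs.length →
      (ks.foldl (fun cs k => PySem.List.pySetD cs k true) cs).getD j false
        = (cs.getD j false || ks.any (fun k => decide (k = (j : Int)))) := by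
  intro ks
  induction ks with
  | nil => intro cs j _ _; simp
  | cons k ks ih =>
      intro cs j hk hj
      have hk0 : 0 ≤ k := hk k (by simp)
      simp only [List.foldl_cons, List.any_cons]
      rw [PySem.List.pySetD_of_nonneg _ _ hk0]
      rw [ih _ j (fun x hx => hk x (by simp [hx])) (by simpa using hj)]
      by_cases hkj : k = (j : Int)
      · have hnat : k.toNat = j := by omega
        rw [List.getD_eq_getElem?_getD, List.getD_eq_getElem?_getD, hnat,
          List.getElem?_set_self hj]
        simp [hkj]
      · have hne : k.toNat ≠ j := by omega
        rw [List.getD_eq_getElem?_getD (l := cs.set k.toNat true),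
          List.getElem?_set_ne hne, ← List.getD_eq_getElem?_getD]
        simp [hkj]

lemma pvCovFold (N : Int) :
    ∀ (is : List Int) (cs : List Bool), (cs.length : Int) = N →
      (∀ i ∈ is, 0 ≤ i ∧ i < N) →
      ((is.foldl (fun cs i =>
          (PySem.List.pyRange (max 0 (i - 2)) (min N (i + 8)) 1).foldl
            (fun cs k => PySem.List.pySetD cs k true) cs) cs).length = cs.length) ∧
      (∀ j : Nat, j < cs.length →
        (is.foldl (fun cs i =>
          (PySem.List.pyRange (max 0 (i - 2)) (min N (i + 8)) 1).foldl
            (fun cs k => PySem.List.pySetD cs k true) cs) cs).getD j false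
          = (cs.getD j false || pvCov N is j)) := by
  intro is
  induction is with
  | nil => intro cs _ _; exact ⟨rfl, by simp [pvCov]⟩
  | cons i is ih =>
      intro cs hN hb
      have hi := hb i (by simp)
      have hks : ∀ k ∈ PySem.List.pyRange (max 0 (i - 2)) (min N (i + 8)) 1, 0 ≤ k := by
        intro k hkm
        have := (PySem.List.mem_pyRange_one).mp hkm
        omega
      have hlen1 : ((PySem.List.pyRange (max 0 (i - 2)) (min N (i + 8)) 1).foldl
          (fun cs k => PySem.List.pySetD cs k true) cs).length = cs.length :=
        pvSetFold_length _ _ hks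
      have hIH := ih ((PySem.List.pyRange (max 0 (i - 2)) (min N (i + 8)) 1).foldl
          (fun cs k => PySem.List.pySetD cs k true) cs)
        (by rw [hlen1]; exact hN) (fun x hx => hb x (by simp [hx]))
      simp only [List.foldl_cons]
      refine ⟨hIH.1.trans hlen1, ?_⟩
      intro j hj
      rw [hIH.2 j (by rw [hlen1]; exact hj)]
      rw [pvSetFold_getD _ _ j hks hj]
      have hany : (PySem.List.pyRange (max 0 (i - 2)) (min N (i + 8)) 1).any
            (fun k => decide (k = (j : Int)))
          = decide (max 0 (i - 2) ≤ (j : Int) ∧ (j : Int) < min N (i + 8)) := by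
        by_cases hmem : max 0 (i - 2) ≤ (j : Int) ∧ (j : Int) < min N (i + 8)
        · rw [decide_eq_true hmem]
          exact List.any_eq_true.mpr
            ⟨(j : Int), (PySem.List.mem_pyRange_one).mpr hmem, by simp⟩
        · rw [decide_eq_false hmem]
          refine List.any_eq_false.mpr ?_
          intro k hkm
          have := (PySem.List.mem_pyRange_one).mp hkm
          simp only [decide_eq_true_eq]
          intro hkj
          exact hmem (by omega)
      rw [hany]
      simp [pvCov, List.any_cons, Bool.or_assoc]

-- ---- B-side: run-scan lemmas ----

lemma pvRunF_false (n : Int) (is : List Int) (a b : Int) (rs : List (Int × Int))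
    (h : ∀ j, a ≤ j → j < b → pvCov n is j = false) :
    pvRunF n is a b rs = rs := by
  unfold pvRunF
  have : ∀ (l : List Int), (∀ j ∈ l, pvCov n is j = false) →
      l.foldl (fun rs j => if pvCov n is j then pvStep rs j else rs) rs = rs := by
    intro l
    induction l generalizing rs with
    | nil => intro _; rfl
    | cons x l ihl =>
        intro hl
        have hx0 : pvCov n is x = false := hl x (by simp)
        rw [List.foldl_cons, if_neg (by simp [hx0])]
        exact ihl _ (fun j hj => hl j (by simp [hj]))
  exact this _ (fun j hj => h j ((PySem.List.mem_pyRange_one).mp hj).1 ((PySem.List.mem_pyRange_one).mp hj).2)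

lemma pvRunF_true_ext (n : Int) (is : List Int) :
    ∀ (c : Nat) (a : Int) (ds : List (Int × Int)) (s : Int),
      (∀ j, a ≤ j → j < a + c → pvCov n is j = true) →
      pvRunF n is a (a + c) (ds ++ [(s, a)]) = ds ++ [(s, a + c)] := by
  intro c
  induction c with
  | zero =>
      intro a ds s _
      unfold pvRunF
      rw [PySem.List.pyRange_one_eq_nil (by omega)]
      simp
  | succ c ihc =>
      intro a ds s h
      unfold pvRunF
      rw [PySem.List.pyRange_one_cons (by omega : a < a + ((c : Nat) + 1 : Nat)),
        List.foldl_cons, if_pos (h a le_rfl (by omega))]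
      rw [show pvStep (ds ++ [(s, a)]) a = ds ++ [(s, a + 1)] by
        unfold pvStep
        rw [List.getLast?_concat]
        simp]
      have hcast : a + (((c : Nat) + 1 : Nat) : Int) = (a + 1) + (c : Int) := by push_cast; ring
      rw [hcast]
      have := ihc (a + 1) ds s (fun j h1 h2 => h j (by omega) (by push_cast at h2 ⊢; omega))
      unfold pvRunF at this
      exact this

lemma pvRunF_true (n : Int) (is : List Int) (a b : Int) (rs : List (Int × Int))
    (hab : a < b) (h : ∀ j, a ≤ j → j < b → pvCov n is j = true) :
    pvRunF n is a b rs = pvMergeStep a b rs := by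
  have hb : a + 1 + (((b - (a + 1)).toNat : Nat) : Int) = b := by omega
  have hext : ∀ (ds : List (Int × Int)) (s : Int),
      pvRunF n is (a + 1) b (ds ++ [(s, a + 1)]) = ds ++ [(s, b)] := by
    intro ds s
    have h2 := pvRunF_true_ext n is (b - (a + 1)).toNat (a + 1) ds s
      (fun j h1 h2 => h j (by omega) (by omega))
    rw [hb] at h2
    exact h2
  unfold pvRunF
  rw [PySem.List.pyRange_one_cons hab, List.foldl_cons, if_pos (h a le_rfl hab)]
  show pvRunF n is (a + 1) b (pvStep rs a) = pvMergeStep a b rs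
  cases hrs : rs.getLast? with
  | none =>
      have hnil : rs = [] := List.getLast?_eq_none_iff.mp hrs
      subst hnil
      rw [show pvStep [] a = [] ++ [(a, a + 1)] from rfl, hext [] a]
      rfl
  | some r =>
      by_cases hc : a - r.2 ≤ 2
      · rw [show pvStep rs a = rs.dropLast ++ [(r.1, a + 1)] by
          unfold pvStep; rw [hrs]; simp [hc]]
        rw [hext rs.dropLast r.1]
        unfold pvMergeStep; rw [hrs]; simp [hc]
      · rw [show pvStep rs a = rs ++ [(a, a + 1)] by
          unfold pvStep; rw [hrs]; simp [hc]]
        rw [hext rs a]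
        unfold pvMergeStep; rw [hrs]; simp [hc]

lemma pvMergeStep_cons (a b : Int) (r : Int × Int) (rs : List (Int × Int)) (h : rs ≠ []) :
    pvMergeStep a b (r :: rs) = r :: pvMergeStep a b rs := by
  unfold pvMergeStep
  cases rs with
  | nil => exact absurd rfl h
  | cons x xs =>
      rw [List.getLast?_cons_cons]
      cases hxl : (x :: xs).getLast? with
      | none => simp at hxl
      | some l =>
          by_cases hc : a - l.2 ≤ 2 <;> simp [hc, List.dropLast_cons₂]

-- ---- capped grouping lemmas ----

lemma capGrp_ne_nil (n m : Int) : ∀ (xs : List Int) (f p : Int), capGrp n m f p xs ≠ [] := by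
  intro xs
  induction xs with
  | nil => intro f p; simp [capGrp]
  | cons x xs ih =>
      intro f p
      unfold capGrp
      split_ifs <;> simp [ih]

lemma capGrp_drop (n m j : Int) (hj : ¬ max 0 (j - 2) < m) :
    ∀ (xs : List Int) (f p : Int), capGrp n m f p (xs ++ [j]) = capGrp n m f p xs := by
  intro xs
  induction xs with
  | nil => intro f p; simp [capGrp, hj]
  | cons x xs ih =>
      intro f p
      simp only [List.cons_append]
      unfold capGrp
      split_ifs <;> simp [ih]

lemma capTop_drop (n m j : Int) (hj : ¬ max 0 (j - 2) < m) (is : List Int) :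
    capTop n m (is ++ [j]) = capTop n m is := by
  cases is with
  | nil => simp [capTop, hj]
  | cons h t =>
      simp only [List.cons_append, capTop]
      split_ifs with hh
      · exact capGrp_drop n m j hj t h h
      · rfl

lemma capGrp_small (n m : Int) (hm : 0 < m) :
    ∀ (xs : List Int) (f p : Int), (∀ x ∈ p :: xs, 0 ≤ x ∧ x ≤ 2) →
      capGrp n m f p xs = [(max 0 (f - 2), min (min n (xs.getLastD p + 8)) m)] := by
  intro xs
  induction xs with
  | nil => intro f p _; simp [capGrp]
  | cons x xs ih =>
      intro f p hall
      have hx := hall x (by simp)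
      have hp := hall p (by simp)
      unfold capGrp
      rw [if_pos (by omega), if_pos (by omega)]
      rw [ih f x (fun y hy => by
        rcases List.mem_cons.mp hy with h | h
        · exact h ▸ hx
        · exact hall y (by simp [h]))]
      rw [List.getLastD_cons]

lemma capGrp_concat (n m j : Int) (hj0 : 0 ≤ j) (hjN : j < n) (hm : max 0 (j - 2) < m) :
    ∀ (xs : List Int) (f p : Int), 0 ≤ p → p < j →
      (∀ x ∈ xs, 0 ≤ x ∧ x < j ∧ max 0 (x - 2) < max 0 (j - 2)) →
      capGrp n m f p (xs ++ [j])
        = pvMergeStep (max 0 (j - 2)) (min (min n (j + 8)) m)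
            (capGrp n (max 0 (j - 2)) f p xs) := by
  intro xs
  induction xs with
  | nil =>
      intro f p hp0 hpj _
      simp only [List.nil_append]
      unfold capGrp
      rw [if_pos hm]
      unfold pvMergeStep
      simp only [List.getLast?_singleton]
      by_cases hc : j - p ≤ 12
      · rw [if_pos hc, if_pos (by omega)]
        simp [capGrp]
      · rw [if_neg hc, if_neg (by omega)]
        have : min (min n (p + 8)) (max 0 (j - 2)) = min n (p + 8) := by omega
        simp [capGrp, this]
  | cons x xs ih =>
      intro f p hp0 hpj hall
      have hx := hall x (by simp)
      have hall' : ∀ y ∈ xs, 0 ≤ y ∧ y < j ∧ max 0 (y - 2) < max 0 (j - 2) :=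
        fun y hy => hall y (by simp [hy])
      simp only [List.cons_append]
      unfold capGrp
      rw [if_pos (by omega : max 0 (x - 2) < m), if_pos hx.2.2]
      by_cases hc : x - p ≤ 12
      · rw [if_pos hc, if_pos hc]
        exact ih f x hx.1 hx.2.1 hall'
      · rw [if_neg hc, if_neg hc]
        rw [ih x x hx.1 hx.2.1 hall']
        rw [pvMergeStep_cons _ _ _ _ (capGrp_ne_nil n (max 0 (j - 2)) xs x x)]

lemma capTop_concat (n m j : Int) (hj0 : 0 ≤ j) (hjN : j < n) (hm : max 0 (j - 2) < m)
    (is : List Int) (hb : ∀ x ∈ is, 0 ≤ x ∧ x < j) :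
    capTop n m (is ++ [j])
      = pvMergeStep (max 0 (j - 2)) (min (min n (j + 8)) m)
          (capTop n (max 0 (j - 2)) is) := by
  cases is with
  | nil =>
      simp only [List.nil_append, capTop]
      rw [if_pos hm]
      simp [capGrp, pvMergeStep, min_comm]
  | cons h t =>
      have hh := hb h (by simp)
      by_cases hsh : max 0 (h - 2) < max 0 (j - 2)
      · have hsj1 : 1 ≤ max 0 (j - 2) := by omega
        simp only [List.cons_append, capTop]
        rw [if_pos (by omega : max 0 (h - 2) < m), if_pos hsh]
        exact capGrp_concat n m j hj0 hjN hm t h h hh.1 hh.2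
          (fun x hx => by
            have hxb := hb x (by simp [hx])
            exact ⟨hxb.1, hxb.2, by omega⟩)
      · have hsj0 : max 0 (j - 2) = 0 := by omega
        have hj2 : j ≤ 2 := by omega
        simp only [List.cons_append, capTop]
        rw [if_pos (by omega : max 0 (h - 2) < m), hsj0]
        rw [if_neg (by omega : ¬ max 0 (h - 2) < 0)]
        rw [capGrp_small n m (by omega) (t ++ [j]) h h
          (fun x hx => by
            rcases List.mem_cons.mp hx with h1 | h1
            · subst h1; exact ⟨hh.1, by omega⟩
            · rcases List.mem_append.mp h1 with h2 | h2
              · have := hb x (by simp [h2]); exact ⟨this.1, by omega⟩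
              · simp at h2; subst h2; exact ⟨hj0, hj2⟩)]
        rw [List.getLastD_concat]
        unfold pvMergeStep
        simp only [List.getLast?_nil, List.nil_append]
        have hh2 : max 0 (h - 2) = 0 := by omega
        rw [hh2]

-- ---- main induction: run scan over coverage = capped grouping ----

lemma pvCov_append (n : Int) (is : List Int) (j k : Int) :
    pvCov n (is ++ [j]) k
      = (pvCov n is k || decide (max 0 (j - 2) ≤ k ∧ k < min n (j + 8))) := by
  simp [pvCov, List.any_append]

lemma pvMain (n : Int) :
    ∀ (is : List Int), is.Pairwise (· < ·) → (∀ i ∈ is, 0 ≤ i ∧ i < n) →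
      ∀ (m : Int), pvRunF n is 0 m [] = capTop n m is := by
  intro is
  induction is using List.reverseRecOn with
  | nil =>
      intro _ _ m
      rw [pvRunF_false n [] 0 m [] (fun j _ _ => by simp [pvCov])]
      rfl
  | append_singleton is j ih =>
      intro hp hb m
      have hpi : is.Pairwise (· < ·) := (List.pairwise_append.mp hp).1
      have hlt : ∀ x ∈ is, x < j :=
        fun x hx => (List.pairwise_append.mp hp).2.2 x hx j (by simp)
      have hbi : ∀ i ∈ is, 0 ≤ i ∧ i < n := fun i hi => hb i (by simp [hi])
      have hj := hb j (by simp)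
      by_cases hm : max 0 (j - 2) < m
      · -- split [0,m) at the window start and window end of j
        have hsj0 : (0 : Int) ≤ max 0 (j - 2) := by omega
        have hsc : max 0 (j - 2) < min (min n (j + 8)) m := by omega
        have hcm : min (min n (j + 8)) m ≤ m := by omega
        unfold pvRunF
        rw [PySem.List.pyRange_one_append 0 (max 0 (j - 2)) m hsj0 (by omega)]
        rw [PySem.List.pyRange_one_append (max 0 (j - 2)) (min (min n (j + 8)) m) m
          (by omega) hcm]
        rw [List.foldl_append, List.foldl_append]
        -- part 1: below the new window, coverage is that of `is`
        have h1 : (PySem.List.pyRange 0 (max 0 (j - 2)) 1).foldl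
            (fun rs k => if pvCov n (is ++ [j]) k then pvStep rs k else rs) []
            = capTop n (max 0 (j - 2)) is := by
          rw [PySem.List.foldl_congr_mem (PySem.List.pyRange 0 (max 0 (j - 2)) 1)
            (fun rs k => if pvCov n (is ++ [j]) k then pvStep rs k else rs)
            (fun rs k => if pvCov n is k then pvStep rs k else rs) []
            (fun acc x hx => by
              dsimp only
              have hxr := (PySem.List.mem_pyRange_one).mp hx
              rw [pvCov_append]
              rw [show decide (max 0 (j - 2) ≤ x ∧ x < min n (j + 8)) = false by
                simp; omega]
              simp)]
          have := ih hpi hbi (max 0 (j - 2))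
          unfold pvRunF at this
          exact this
        rw [h1]
        -- part 2: the new window is fully covered
        have h2 : ∀ (rs : List (Int × Int)),
            (PySem.List.pyRange (max 0 (j - 2)) (min (min n (j + 8)) m) 1).foldl
              (fun rs k => if pvCov n (is ++ [j]) k then pvStep rs k else rs) rs
            = pvMergeStep (max 0 (j - 2)) (min (min n (j + 8)) m) rs := by
          intro rs
          have := pvRunF_true n (is ++ [j]) (max 0 (j - 2)) (min (min n (j + 8)) m) rs hsc
            (fun k h1k h2k => by
              rw [pvCov_append]
              rw [show decide (max 0 (j - 2) ≤ k ∧ k < min n (j + 8)) = true by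
                simp; omega]
              simp)
          unfold pvRunF at this
          exact this
        rw [h2]
        -- part 3: beyond the new window, nothing is covered
        have h3 : ∀ (rs : List (Int × Int)),
            (PySem.List.pyRange (min (min n (j + 8)) m) m 1).foldl
              (fun rs k => if pvCov n (is ++ [j]) k then pvStep rs k else rs) rs
            = rs := by
          intro rs
          have := pvRunF_false n (is ++ [j]) (min (min n (j + 8)) m) m rs
            (fun k h1k h2k => by
              rw [pvCov_append]
              have hk8 : min n (j + 8) ≤ k := by omega
              rw [show decide (max 0 (j - 2) ≤ k ∧ k < min n (j + 8)) = false by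
                simp; omega]
              rw [show pvCov n is k = false by
                unfold pvCov
                simp only [List.any_eq_false]
                intro i hi
                have := hbi i hi
                have := hlt i hi
                simp; omega]
              rfl)
          unfold pvRunF at this
          exact this
        rw [h3]
        exact (capTop_concat n m j hj.1 hj.2 hm is
          (fun x hx => ⟨(hbi x hx).1, hlt x hx⟩)).symm
      · -- the new window starts at or beyond the cutoff: nothing changes
        unfold pvRunF
        rw [PySem.List.foldl_congr_mem (PySem.List.pyRange 0 m 1)
          (fun rs k => if pvCov n (is ++ [j]) k then pvStep rs k else rs)
          (fun rs k => if pvCov n is k then pvStep rs k else rs) []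
          (fun acc x hx => by
            dsimp only
            have hxr := (PySem.List.mem_pyRange_one).mp hx
            rw [pvCov_append]
            rw [show decide (max 0 (j - 2) ≤ x ∧ x < min n (j + 8)) = false by
              simp; omega]
            simp)]
        have := ih hpi hbi m
        unfold pvRunF at this
        rw [this]
        exact (capTop_drop n m j hm is).symm

-- ---- capped grouping at full cutoff = plain grouping ----

lemma capGrp_full (n : Int) (hn : 0 < n) :
    ∀ (t : List Int) (f p : Int), p < n → (∀ x ∈ t, x < n) →
      capGrp n n f p t = pvGrp n f p t := by
  intro t
  induction t with
  | nil =>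
      intro f p hpn _
      unfold capGrp pvGrp
      congr 1
      have : min (min n (p + 8)) n = min n (p + 8) := by omega
      rw [this]
  | cons j t ih =>
      intro f p hpn hb
      have hjn : j < n := hb j (by simp)
      have hb' : ∀ x ∈ t, x < n := fun x hx => hb x (by simp [hx])
      unfold capGrp pvGrp
      rw [if_pos (by omega : max 0 (j - 2) < n)]
      by_cases hc : j - p ≤ 12
      · rw [if_pos hc, if_pos hc, ih f j hjn hb']
      · rw [if_neg hc, if_neg hc, ih j j hjn hb']

lemma capTop_full (lines : List String) :
    capTop (lines.length : Int) (lines.length : Int) (pvHitsOf lines)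
      = pvTop (lines.length : Int) (pvHitsOf lines) := by
  cases hhits : pvHitsOf lines with
  | nil => rfl
  | cons h t =>
      have hb := pvHitsBounds lines
      rw [hhits] at hb
      have hh := hb h (by simp)
      show (if max 0 (h - 2) < (lines.length : Int) then
          capGrp (lines.length : Int) (lines.length : Int) h h t else [])
        = pvGrp (lines.length : Int) h h t
      rw [if_pos (by omega : max 0 (h - 2) < (lines.length : Int))]
      exact capGrp_full (lines.length : Int) (by omega) t h h hh.2
        (fun x hx => (hb x (by simp [hx])).2)

-- ---- B port characterization ----

lemma B_char (lines : List String) :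
    collect_representative_windows_py_alt lines
      = PySem.List.slice
          (capTop (lines.length : Int) (lines.length : Int) (pvHitsOf lines)) none (some 8) := by
  unfold collect_representative_windows_py_alt
  dsimp only
  -- step 1: the coverage list is the hit-index fold
  have hCeq : (PySem.List.enumerate lines).foldl
      (fun cs p =>
        if pvMatch p.2 then
          (PySem.List.pyRange (max 0 (p.1 - 2)) (min (lines.length : Int) (p.1 + 8)) 1).foldl
            (fun cs k => PySem.List.pySetD cs k true) cs
        else cs)
      (List.replicate lines.length false)
      = (pvHitsOf lines).foldl
          (fun cs i =>
            (PySem.List.pyRange (max 0 (i - 2)) (min (lines.length : Int) (i + 8)) 1).foldl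
              (fun cs k => PySem.List.pySetD cs k true) cs)
          (List.replicate lines.length false) := by
    rw [← List.foldl_filter]
    unfold pvHitsOf
    rw [List.foldl_map]
  rw [hCeq]
  have hprops := pvCovFold (lines.length : Int) (pvHitsOf lines)
    (List.replicate lines.length false) (by simp) (pvHitsBounds lines)
  set C := (pvHitsOf lines).foldl
      (fun cs i =>
        (PySem.List.pyRange (max 0 (i - 2)) (min (lines.length : Int) (i + 8)) 1).foldl
          (fun cs k => PySem.List.pySetD cs k true) cs)
      (List.replicate lines.length false) with hC
  have hlen : C.length = lines.length := by
    rw [hC, hprops.1]; simp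
  have hget : ∀ j : Nat, j < lines.length →
      C.getD j false = pvCov (lines.length : Int) (pvHitsOf lines) j := by
    intro j hj
    rw [hC, hprops.2 j (by simp [hj])]
    simp
  -- step 2: the run scan over the coverage list is pvRunF
  rw [PySem.List.enumerate_eq_map_pyRange C false]
  rw [List.foldl_map]
  have hlenC : PySem.List.len C = (lines.length : Int) := by
    rw [PySem.List.len_eq, hlen]
  rw [hlenC]
  have hcongr : (PySem.List.pyRange 0 (lines.length : Int) 1).foldl
      (fun rs j =>
        if (j, PySem.List.pyGetD C j false).2 then
          match rs.getLast? with
          | some r =>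
              if (j, PySem.List.pyGetD C j false).1 - r.2 ≤ 2 then
                rs.dropLast ++ [(r.1, (j, PySem.List.pyGetD C j false).1 + 1)]
              else rs ++ [((j, PySem.List.pyGetD C j false).1, (j, PySem.List.pyGetD C j false).1 + 1)]
          | none => rs ++ [((j, PySem.List.pyGetD C j false).1, (j, PySem.List.pyGetD C j false).1 + 1)]
        else rs) []
      = (PySem.List.pyRange 0 (lines.length : Int) 1).foldl
          (fun rs j => if pvCov (lines.length : Int) (pvHitsOf lines) j then pvStep rs j else rs) [] := by
    refine PySem.List.foldl_congr_mem _ _ _ _ ?_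
    intro acc x hx
    have hxr := (PySem.List.mem_pyRange_one).mp hx
    have hx' : x.toNat < C.length := by omega
    have hgx : PySem.List.pyGetD C x false = pvCov (lines.length : Int) (pvHitsOf lines) x := by
      rw [PySem.List.pyGetD_eq_getElem C false hxr.1 (by rw [hlen]; exact hxr.2)]
      rw [← List.getD_eq_getElem C false hx']
      rw [hget x.toNat (by omega)]
      rw [Int.toNat_of_nonneg hxr.1]
    dsimp only
    rw [hgx]
    unfold pvStep
    rfl
  rw [hcongr]
  have hmain := pvMain (lines.length : Int) (pvHitsOf lines) (pvHitsSorted lines)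
    (pvHitsBounds lines) (lines.length : Int)
  unfold pvRunF at hmain
  rw [hmain]

-- ===== VERDICT (by name: the statement is the Claim_ definition above) =====
theorem collect_representative_windows_py_spec : Claim_equal_collect_representative_windows_py := by
  intro lines _
  unfold Spec_collect_representative_windows_py
  rw [A_char, B_char, capTop_full]
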